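-- pv_equiv track=rewrite | github.com/Ayushkaundal27/DES_Algo | cryptogrsphy_algorithms/des_functions/xor.py | xor_with_key
-- ===== SOURCE A (Python) =====
-- def xor_with_key(d1, d2):
--     x = 0
--     for i in range(0, len(d1)):
--         temp = ''
--         for j in range(0, len(d1[i])):
--             ans = int(d1[i][j]) ^ int(d2[x])
--             temp = temp+str(ans)
--             x = x + 1
--         d1[i] = temp
--     return d1
-- ===== SOURCE B (Python) =====
-- def xor_with_key(d1, d2):
--     # Equivalence is about the return value: A mutates d1 in place, B builds a new list.
--     out = []
--     pos = 0
--     for s in d1: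
--         seg = d2[pos:pos + len(s)]
--         out.append(''.join(str(int(a) ^ int(b)) for a, b in zip(s, seg)))
--         pos += len(s)
--     return out
-- ===== Notes on version B (the rewrite author's own statement) =====
-- stated objective: simpler
-- what changed: B replaces A's index-driven nested loops with in-place assignment by a single pass over the strings themselves, slicing the matching key segment and assembling each output with ''.join over zipped character pairs instead of char-by-char string concatenation with a shared running counter.
import Mathlib
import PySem

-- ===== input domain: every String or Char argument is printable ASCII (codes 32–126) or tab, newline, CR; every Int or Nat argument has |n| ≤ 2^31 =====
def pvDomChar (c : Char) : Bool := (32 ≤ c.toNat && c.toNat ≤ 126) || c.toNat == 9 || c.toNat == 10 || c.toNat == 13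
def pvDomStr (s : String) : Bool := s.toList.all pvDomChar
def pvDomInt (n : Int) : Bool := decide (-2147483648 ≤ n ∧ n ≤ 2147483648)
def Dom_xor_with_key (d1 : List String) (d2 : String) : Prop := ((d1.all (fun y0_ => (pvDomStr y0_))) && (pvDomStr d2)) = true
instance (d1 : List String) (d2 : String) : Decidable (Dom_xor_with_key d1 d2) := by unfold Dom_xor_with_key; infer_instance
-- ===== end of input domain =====

-- B is a single pass over the strings themselves (no shared index into d1, no in-place update),
-- slicing the matching key segment and joining per-character XORs; same cost, simpler shape.
-- Equivalence is about the return value: the Python A mutates d1 in place, B does not.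

-- ===== PORT A =====
-- inner loop: for j in range(len(d1[i])): ans = int(d1[i][j]) ^ int(d2[x]); temp += str(ans); x += 1
def pvInnerStep (di d2 : List Char) (t : List Char × Nat) (j : Nat) : List Char × Nat :=
  let a := (PySem.List.pyGet? di (j : Int)).getD ' '
  let b := (PySem.List.pyGet? d2 ((t.2 : Int))).getD ' '
  let ans := PySem.Int.bxor ((PySem.Int.ofChars? [a]).getD 0) ((PySem.Int.ofChars? [b]).getD 0)
  (t.1 ++ PySem.Int.toChars ans, t.2 + 1)

def pvInnerA (di d2 : List Char) (x : Nat) : List Char × Nat :=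
  (List.range di.length).foldl (pvInnerStep di d2) ([], x)

-- body of: for i in range(len(d1)): … ; d1[i] = temp
def pvStepA (d2 : List Char) (st : List String × Nat) (i : Nat) : List String × Nat :=
  let di := ((PySem.List.pyGet? st.1 (i : Int)).getD "").toList
  let r := pvInnerA di d2 st.2
  (st.1.set i (String.ofList r.1), r.2)

def xor_with_key (d1 : List String) (d2 : String) : List String :=
  ((List.range d1.length).foldl (pvStepA d2.toList) (d1, 0)).1

-- ===== PORT B =====
-- str(int(a) ^ int(b))
def pvCharXor (a b : Char) : List Char :=
  PySem.Int.toChars (PySem.Int.bxor ((PySem.Int.ofChars? [a]).getD 0) ((PySem.Int.ofChars? [b]).getD 0))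

-- body of: for s in d1: seg = d2[pos:pos+len(s)]; out.append(''.join(…)); pos += len(s)
def pvStepB (d2 : List Char) (st : List String × Nat) (s : String) : List String × Nat :=
  let n := s.toList.length
  let seg := PySem.List.slice d2 (some ((st.2 : Int))) (some ((st.2 : Int) + (n : Int)))
  let piece := ((s.toList.zip seg).map (fun p => pvCharXor p.1 p.2)).flatten
  (st.1 ++ [String.ofList piece], st.2 + n)

def xor_with_key_alt (d1 : List String) (d2 : String) : List String :=
  (d1.foldl (pvStepB d2.toList) ([], 0)).1

-- ===== PRECONDITION & SPEC =====
-- Pre_ is exactly where the Python A returns: every char of d1 a digit (else int() raises ValueError),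
-- the key long enough for the total bit count (else IndexError), and the consumed key prefix digits.
def Pre_xor_with_key (d1 : List String) (d2 : String) : Prop :=
  ((d1.all (fun s => s.toList.all Char.isDigit)) &&
   ((d1.map (fun s => s.toList.length)).sum ≤ d2.toList.length) &&
   ((d2.toList.take ((d1.map (fun s => s.toList.length)).sum)).all Char.isDigit)) = true

instance (d1 : List String) (d2 : String) : Decidable (Pre_xor_with_key d1 d2) := by
  unfold Pre_xor_with_key; infer_instance

def pvWitness_xor_with_key : List String × String := (["10"], "11")

def Spec_xor_with_key (d1 : List String) (d2 : String) (out : List String) : Prop := out = xor_with_key_alt d1 d2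
instance (d1 : List String) (d2 : String) (out : List String) : Decidable (Spec_xor_with_key d1 d2 out) := by unfold Spec_xor_with_key; infer_instance

-- ===== CLAIM (what is proved, stated in full; the proofs are below) =====
def Claim_equal_xor_with_key : Prop := ∀ (d1 : List String) (d2 : String), Dom_xor_with_key d1 d2 → Pre_xor_with_key d1 d2 → Spec_xor_with_key d1 d2 (xor_with_key d1 d2)

-- ===== LEMMAS AND PROOFS =====

-- common skeleton both loops are reduced to: process the strings front to back threading the key index
def pvGo (d2 : List Char) : List String → Nat → List String × Nat
  | [], x => ([], x)
  | s :: rest, x =>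
    let r := pvInnerA s.toList d2 x
    let rc := pvGo d2 rest r.2
    (String.ofList r.1 :: rc.1, rc.2)

lemma pvA_loop (d2 : List Char) :
    ∀ (rest done : List String) (x : Nat),
      (List.range' done.length rest.length).foldl (pvStepA d2) (done ++ rest, x)
        = (done ++ (pvGo d2 rest x).1, (pvGo d2 rest x).2) := by
  intro rest
  induction rest with
  | nil => intro done x; simp [pvGo]
  | cons s rest ih =>
    intro done x
    rw [List.length_cons, List.range'_succ, List.foldl_cons]
    have hstep : pvStepA d2 (done ++ s :: rest, x) done.length
        = (done ++ String.ofList (pvInnerA s.toList d2 x).1 :: rest, (pvInnerA s.toList d2 x).2) := by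
      simp [pvStepA]
    rw [hstep]
    have h2 : done ++ String.ofList (pvInnerA s.toList d2 x).1 :: rest
        = (done ++ [String.ofList (pvInnerA s.toList d2 x).1]) ++ rest := by simp
    have h3 : done.length + 1 = (done ++ [String.ofList (pvInnerA s.toList d2 x).1]).length := by simp
    rw [h2, h3, ih]
    simp [pvGo]

lemma pvInner_aux (d2 : List Char) :
    ∀ (t s : List Char) (p : Nat), s.drop p = t → ∀ (x : Nat) (acc : List Char),
      x + t.length ≤ d2.length →
      (List.range' p t.length).foldl (pvInnerStep s d2) (acc, x)
        = (acc ++ ((t.zip ((d2.drop x).take t.length)).map (fun q => pvCharXor q.1 q.2)).flatten,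
           x + t.length) := by
  intro t
  induction t with
  | nil => intro s p hp x acc h; simp
  | cons c t ih =>
    intro s p hp x acc h
    rw [List.length_cons] at h
    have hx : x < d2.length := by omega
    have hsp : s[p]? = some c := by
      have := congrArg (fun l => l[0]?) hp
      simpa using this
    have hstep : pvInnerStep s d2 (acc, x) p = (acc ++ pvCharXor c d2[x], x + 1) := by
      simp [pvInnerStep, pvCharXor, hsp, hx]
    rw [List.length_cons, List.range'_succ, List.foldl_cons, hstep]
    have hdrop : s.drop (p + 1) = t := by
      have : (s.drop p).drop 1 = s.drop (p + 1) := by rw [List.drop_drop]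
      rw [← this, hp]; rfl
    rw [ih s (p + 1) hdrop (x + 1) _ (by omega)]
    have hd2 : d2.drop x = d2[x] :: d2.drop (x + 1) := List.drop_eq_getElem_cons hx
    simp
    refine ⟨?_, by omega⟩
    rw [hd2]
    simp only [List.take_succ_cons, List.zip_cons_cons, List.map_cons, List.flatten_cons]

lemma pvInnerA_spec (d2 t : List Char) (x : Nat) (h : x + t.length ≤ d2.length) :
    pvInnerA t d2 x
      = (((t.zip ((d2.drop x).take t.length)).map (fun q => pvCharXor q.1 q.2)).flatten,
         x + t.length) := by
  unfold pvInnerA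
  rw [List.range_eq_range']
  exact pvInner_aux d2 t t 0 (by simp) x [] h

lemma pvB_loop (d2 : List Char) :
    ∀ (ss : List String) (acc : List String) (x : Nat),
      x + (ss.map (fun s => s.toList.length)).sum ≤ d2.length →
      ss.foldl (pvStepB d2) (acc, x) = (acc ++ (pvGo d2 ss x).1, (pvGo d2 ss x).2) := by
  intro ss
  induction ss with
  | nil => intro acc x h; simp [pvGo]
  | cons s rest ih =>
    intro acc x h
    simp only [List.map_cons, List.sum_cons] at h
    have hn : x + s.toList.length ≤ d2.length := by omega
    have hseg : PySem.List.slice d2 (some (x : Int)) (some ((x : Int) + (s.toList.length : Int)))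
        = (d2.drop x).take s.toList.length := PySem.List.slice_natCast_add d2 x s.toList.length
    have hinner := pvInnerA_spec d2 s.toList x hn
    have hstep : pvStepB d2 (acc, x) s
        = (acc ++ [String.ofList (pvInnerA s.toList d2 x).1], (pvInnerA s.toList d2 x).2) := by
      simp only [pvStepB]
      rw [hseg, hinner]
    rw [List.foldl_cons, hstep]
    rw [show (pvInnerA s.toList d2 x).2 = x + s.toList.length from by rw [hinner]]
    rw [ih (acc ++ [String.ofList (pvInnerA s.toList d2 x).1]) (x + s.toList.length) (by omega)]
    simp [pvGo, hinner]

-- ===== VERDICT (by name: the statement is the Claim_ definition above) =====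
theorem xor_with_key_spec : Claim_equal_xor_with_key := by
  intro d1 d2 _ hpre
  unfold Spec_xor_with_key
  have hlen : (d1.map (fun s => s.toList.length)).sum ≤ d2.toList.length := by
    simp only [Pre_xor_with_key, Bool.and_eq_true, decide_eq_true_eq] at hpre
    exact hpre.1.2
  have hA : xor_with_key d1 d2 = (pvGo d2.toList d1 0).1 := by
    unfold xor_with_key
    rw [List.range_eq_range']
    have := pvA_loop d2.toList d1 [] 0
    simp at this
    rw [this]
  have hB : xor_with_key_alt d1 d2 = (pvGo d2.toList d1 0).1 := by
    unfold xor_with_key_alt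
    rw [pvB_loop d2.toList d1 [] 0 (by simpa using hlen)]
    simp
  rw [hA, hB]
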